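-- pv_equiv track=rewrite | github.com/rf-iasys/OEIS | OEIS_A056236.py | A056236
-- ===== SOURCE A (Python) =====
-- def A056236(n):
--     marked = []
--     current = 1
--     k = 1
--
--     while len(marked) < n:
--         marked.append(k+1)
--         k += k + current
--         current += k + 1
--
--     return marked
-- ===== SOURCE B (Python) =====
-- def A056236(n):
--     marked = []
--     a, b = 2, 4
--     while len(marked) < n:
--         marked.append(a)
--         a, b = b, 4*b - 2*a
--     return marked
-- ===== Notes on version B (the rewrite author's own statement) =====
-- stated objective: simpler
-- what changed: B drops A's auxiliary coupled state (k, current) and instead maintains the two most recent output terms directly via the second-order recurrence t_{n+2} = 4*t_{n+1} - 2*t_n with t1=2, t2=4.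
import Mathlib
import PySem

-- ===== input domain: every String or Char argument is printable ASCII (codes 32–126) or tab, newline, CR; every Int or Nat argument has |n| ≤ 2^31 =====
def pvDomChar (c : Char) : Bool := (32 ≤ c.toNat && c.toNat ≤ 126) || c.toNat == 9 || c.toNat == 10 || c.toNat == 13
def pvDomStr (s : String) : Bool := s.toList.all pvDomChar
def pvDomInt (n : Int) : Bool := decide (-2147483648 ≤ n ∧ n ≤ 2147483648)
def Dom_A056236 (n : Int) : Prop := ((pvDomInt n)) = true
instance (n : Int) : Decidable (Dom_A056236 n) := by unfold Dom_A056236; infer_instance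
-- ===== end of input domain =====

-- B maintains the two most recent output terms via t_{n+2} = 4*t_{n+1} - 2*t_n instead of A's auxiliary (k, current) state; objective: simpler.


-- ===== PORT A =====
-- while len(marked) < n: one iteration per remaining slot; rem = n - len(marked)
def A056236_loop (rem : Nat) (k current : Int) (marked : List Int) : List Int :=
  match rem with
  | 0 => marked
  | r + 1 =>
    let marked' := marked ++ [k + 1]
    let k' := k + (k + current)
    let current' := current + (k' + 1)
    A056236_loop r k' current' marked'

def A056236 (n : Int) : List Int := A056236_loop n.toNat 1 1 []

-- ===== PORT B =====
def A056236_alt_loop (rem : Nat) (a b : Int) (marked : List Int) : List Int :=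
  match rem with
  | 0 => marked
  | r + 1 => A056236_alt_loop r b (4 * b - 2 * a) (marked ++ [a])

def A056236_alt (n : Int) : List Int := A056236_alt_loop n.toNat 2 4 []

-- ===== PRECONDITION & SPEC =====
def Spec_A056236 (n : Int) (out : List Int) : Prop := out = A056236_alt n
instance (n : Int) (out : List Int) : Decidable (Spec_A056236 n out) := by unfold Spec_A056236; infer_instance

-- ===== CLAIM (what is proved, stated in full; the proofs are below) =====
def Claim_equal_A056236 : Prop := ∀ (n : Int), Dom_A056236 n → Spec_A056236 n (A056236 n)

-- ===== LEMMAS AND PROOFS =====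
-- invariant: A's state (k, current) corresponds to B's pair (k+1, 2k+current+1)
theorem A056236_loop_eq (rem : Nat) : ∀ (k current : Int) (marked : List Int),
    A056236_loop rem k current marked
      = A056236_alt_loop rem (k + 1) (2 * k + current + 1) marked := by
  induction rem with
  | zero => intro k current marked; rfl
  | succ r ih =>
    intro k current marked
    simp only [A056236_loop, A056236_alt_loop]
    rw [ih]
    ring_nf

-- ===== VERDICT (by name: the statement is the Claim_ definition above) =====
theorem A056236_spec : Claim_equal_A056236 := by
  intro n _
  unfold Spec_A056236 A056236 A056236_alt
  rw [A056236_loop_eq]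
  norm_num
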